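-- pv_equiv track=rewrite | github.com/Davidkalikalman/web-vibe-coding | translation-system/src/services/file_processor.py | extract_translatable_content
-- ===== SOURCE A (Python) =====
-- from typing import Dict, List, Optional, Any, Tuple
--
-- def extract_translatable_content(content: str) -> List[Tuple[str, str]]:
--     """Extract paragraphs from text file"""
--     paragraphs = []
--     lines = content.split("\n")
--     current_paragraph = []
--     paragraph_id = 0
--
--     for line in lines:
--         line = line.strip()
--         if line:
--             current_paragraph.append(line)
--         else:
--             if current_paragraph:
--                 paragraph_text = " ".join(current_paragraph)
--                 paragraphs.append((f"paragraph_{paragraph_id}", paragraph_text))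
--                 current_paragraph = []
--                 paragraph_id += 1
--
--     # Add final paragraph if exists
--     if current_paragraph:
--         paragraph_text = " ".join(current_paragraph)
--         paragraphs.append((f"paragraph_{paragraph_id}", paragraph_text))
--
--     return paragraphs
-- ===== SOURCE B (Python) =====
-- from typing import List, Tuple
--
-- def extract_translatable_content(content: str) -> List[Tuple[str, str]]:
--     """Extract paragraphs: find blank-line positions, slice between consecutive ones."""
--     lines = content.split("\n")
--     blanks = [-1] + [i for i, l in enumerate(lines) if not l.strip()] + [len(lines)]
--     chunks = [lines[a + 1 : b] for a, b in zip(blanks, blanks[1:])]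
--     paras = [chunk for chunk in chunks if chunk]
--     return [(f"paragraph_{i}", " ".join(l.strip() for l in chunk))
--             for i, chunk in enumerate(paras)]
-- ===== Notes on version B (the rewrite author's own statement) =====
-- stated objective: alternative
-- what changed: Replaces A's stateful accumulate-and-flush scan with a boundary-based algorithm: compute the positions of all blank lines (with -1/len sentinels), slice the line list between consecutive blank positions, drop empty slices, and enumerate the remaining chunks into (id, joined text) pairs.
import Mathlib
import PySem

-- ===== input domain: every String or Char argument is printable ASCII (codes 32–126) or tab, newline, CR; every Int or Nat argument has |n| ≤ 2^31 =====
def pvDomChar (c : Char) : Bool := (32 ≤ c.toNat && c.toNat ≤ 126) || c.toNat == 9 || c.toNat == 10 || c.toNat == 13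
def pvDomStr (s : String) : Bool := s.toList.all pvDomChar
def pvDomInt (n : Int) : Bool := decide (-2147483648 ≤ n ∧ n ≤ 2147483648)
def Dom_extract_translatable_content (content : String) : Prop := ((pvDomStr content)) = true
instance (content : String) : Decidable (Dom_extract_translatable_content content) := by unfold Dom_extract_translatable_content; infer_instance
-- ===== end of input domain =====

-- B replaces A's stateful accumulate-and-flush scan by a boundary algorithm: compute the blank-line
-- positions (with -1/len sentinels), slice between consecutive positions, drop empty slices,
-- enumerate the chunks. Same values; objective: alternative.

-- ===== PORT A =====
-- the for-loop over lines with state (paragraphs, current_paragraph, paragraph_id), then the final flush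
def pvAGo (lines : List String) (paragraphs : List (String × String))
    (current : List String) (pid : Int) : List (String × String) :=
  match lines with
  | [] =>
    if current ≠ [] then
      paragraphs ++ [("paragraph_" ++ PySem.Int.toStr pid, PySem.Str.join " " current)]
    else paragraphs
  | l :: rest =>
    let s := PySem.Str.strip l
    if s ≠ "" then pvAGo rest paragraphs (current ++ [s]) pid
    else if current ≠ [] then
      pvAGo rest (paragraphs ++ [("paragraph_" ++ PySem.Int.toStr pid, PySem.Str.join " " current)]) [] (pid + 1)
    else pvAGo rest paragraphs current pid

def extract_translatable_content (content : String) : List (String × String) :=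
  pvAGo (((PySem.Str.split? content "\n").getD [])) [] [] 0

-- ===== PORT B =====
-- blanks = [-1] + [i for i, l in enumerate(lines) if not l.strip()] + [len(lines)]
def pvBlanks (lines : List String) : List Int :=
  [-1] ++ ((PySem.List.enumerate lines).filter (fun p => PySem.Str.strip p.2 == "")).map (fun p => p.1)
       ++ [(lines.length : Int)]

-- chunks = [lines[a + 1 : b] for a, b in zip(blanks, blanks[1:])]
def pvChunks (lines : List String) : List (List String) :=
  ((pvBlanks lines).zip (pvBlanks lines).tail).map
    (fun p => PySem.List.slice lines (some (p.1 + 1)) (some p.2))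

def extract_translatable_content_alt (content : String) : List (String × String) :=
  let lines := (PySem.Str.split? content "\n").getD []
  let paras := (pvChunks lines).filter (fun c => !c.isEmpty)
  (PySem.List.enumerate paras).map
    (fun p => ("paragraph_" ++ PySem.Int.toStr p.1, PySem.Str.join " " (p.2.map PySem.Str.strip)))

-- ===== PRECONDITION & SPEC =====
def Spec_extract_translatable_content (content : String) (out : List (String × String)) : Prop := out = extract_translatable_content_alt content
instance (content : String) (out : List (String × String)) : Decidable (Spec_extract_translatable_content content out) := by unfold Spec_extract_translatable_content; infer_instance

-- ===== CLAIM (what is proved, stated in full; the proofs are below) =====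
def Claim_equal_extract_translatable_content : Prop := ∀ (content : String), Dom_extract_translatable_content content → Spec_extract_translatable_content content (extract_translatable_content content)

-- ===== LEMMAS AND PROOFS =====

-- canonical paragraph decomposition: maximal runs of non-blank lines
def pvGroups : List String → List (List String)
  | [] => []
  | l :: rest =>
    if PySem.Str.strip l ≠ "" then
      (l :: rest.takeWhile (fun x => PySem.Str.strip x ≠ "")) ::
        pvGroups (rest.dropWhile (fun x => PySem.Str.strip x ≠ ""))
    else pvGroups rest
termination_by ls => ls.length
decreasing_by
  · exact Nat.lt_succ_of_le (List.length_dropWhile_le _ _)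
  · exact Nat.lt_succ_self _

-- rendering groups into (id, text) pairs from a starting id
def pvRender (pid : Int) : List (List String) → List (String × String)
  | [] => []
  | g :: t => ("paragraph_" ++ PySem.Int.toStr pid, PySem.Str.join " " (g.map PySem.Str.strip)) :: pvRender (pid + 1) t

-- A's loop from state (acc, cur, pid) equals acc ++ (pending paragraph, then the rendered groups)
lemma pvAGo_eq (lines : List String) (acc : List (String × String))
    (cur : List String) (pid : Int) :
    pvAGo lines acc cur pid =
      acc ++ (match cur with
        | [] => pvRender pid (pvGroups lines)
        | _ =>
          ("paragraph_" ++ PySem.Int.toStr pid,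
            PySem.Str.join " " (cur ++ (lines.takeWhile (fun x => PySem.Str.strip x ≠ "")).map PySem.Str.strip))
            :: pvRender (pid + 1) (pvGroups (lines.dropWhile (fun x => PySem.Str.strip x ≠ "")))) := by
  induction lines generalizing acc cur pid with
  | nil =>
    cases cur with
    | nil => simp [pvAGo, pvGroups, pvRender]
    | cons c cs => simp [pvAGo, pvGroups, pvRender]
  | cons l rest ih =>
    by_cases hs : PySem.Str.strip l ≠ ""
    · rw [pvAGo]
      simp only [ne_eq, hs, not_false_eq_true, if_true]
      rw [ih]
      cases cur with
      | nil =>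
        conv_rhs => rw [pvGroups.eq_def]
        simp [hs, pvRender]
      | cons c cs =>
        simp [hs]
    · push Not at hs
      rw [pvAGo]
      simp only [hs, ne_eq, not_true_eq_false, if_false]
      cases cur with
      | nil =>
        simp only [not_true_eq_false, if_false]
        rw [ih]
        conv_rhs => rw [pvGroups.eq_def]
        simp [hs]
      | cons c cs =>
        simp only [reduceCtorEq, not_false_eq_true, if_true]
        rw [ih]
        conv_rhs => rw [pvGroups.eq_def]
        simp [hs]

-- enumerate from s+1 is enumerate from s with indices shifted
lemma pvEnumShift {α : Type} (xs : List α) (s : Int) :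
    PySem.List.enumerate xs (s + 1) = (PySem.List.enumerate xs s).map (fun p => (p.1 + 1, p.2)) := by
  induction xs generalizing s with
  | nil => simp [PySem.List.enumerate_nil]
  | cons x xs ih => simp [PySem.List.enumerate_cons, ih]

-- indices produced by enumerate are at least the start
lemma pvEnumFstLe {α : Type} (xs : List α) (s : Int) (p : Int × α)
    (hp : p ∈ PySem.List.enumerate xs s) : s ≤ p.1 := by
  induction xs generalizing s with
  | nil => simp [PySem.List.enumerate_nil] at hp
  | cons x xs ih =>
    rw [PySem.List.enumerate_cons] at hp
    rcases List.mem_cons.mp hp with h | h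
    · simp [h]
    · have := ih (s + 1) h; omega

lemma pvBlanks_tail_nonneg (lines : List String) (x : Int)
    (hx : x ∈ (pvBlanks lines).tail) : 0 ≤ x := by
  simp [pvBlanks] at hx
  rcases hx with ⟨b, hmem, _⟩ | rfl
  · exact pvEnumFstLe lines 0 (x, b) hmem
  · exact Int.natCast_nonneg _

lemma pvBlanks_cons_blank (l : String) (rest : List String) (h : PySem.Str.strip l = "") :
    pvBlanks (l :: rest) = -1 :: (pvBlanks rest).map (· + 1) := by
  simp only [pvBlanks, PySem.List.enumerate_cons, pvEnumShift, List.filter_cons, h,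
    List.filter_map, List.map_map, List.cons_append, List.nil_append, List.map_append,
    List.map_cons, List.map_nil, List.length_cons]
  simp [Function.comp_def]

lemma pvBlanks_cons_nonblank (l : String) (rest : List String) (h : ¬ PySem.Str.strip l = "") :
    pvBlanks (l :: rest) = -1 :: ((pvBlanks rest).map (· + 1)).tail := by
  simp only [pvBlanks, PySem.List.enumerate_cons, pvEnumShift, List.filter_cons,
    List.filter_map, List.map_map, List.cons_append, List.nil_append, List.map_append,
    List.map_cons, List.map_nil, List.length_cons]
  simp [Function.comp_def, h]

lemma pvSliceShift {α : Type} (x : α) (xs : List α) (a b : Int) (ha : 0 ≤ a) (hb : 0 ≤ b) :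
    PySem.List.slice (x :: xs) (some (a + 1)) (some (b + 1)) = PySem.List.slice xs (some a) (some b) := by
  rw [PySem.List.slice_toNat _ (by omega) (by omega), PySem.List.slice_toNat _ ha hb]
  have h1 : (a + 1).toNat = a.toNat + 1 := by omega
  have h2 : (b + 1).toNat = b.toNat + 1 := by omega
  simp [h1, h2]

lemma pvSliceZero {α : Type} (x : α) (xs : List α) (b : Int) (hb : 0 ≤ b) :
    PySem.List.slice (x :: xs) (some 0) (some (b + 1)) = x :: PySem.List.slice xs (some 0) (some b) := by
  rw [PySem.List.slice_toNat _ (by omega) (by omega), PySem.List.slice_toNat _ (by omega) hb]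
  have h2 : (b + 1).toNat = b.toNat + 1 := by omega
  simp [h2]

lemma pvMemBlanksGe (ls : List String) (x : Int) (hx : x ∈ pvBlanks ls) : -1 ≤ x := by
  have hhead : pvBlanks ls = -1 :: (pvBlanks ls).tail := rfl
  rw [hhead] at hx
  rcases List.mem_cons.mp hx with rfl | hx'
  · omega
  · have := pvBlanks_tail_nonneg ls x hx'; omega

-- pairs of consecutive elements of a mapped list
lemma pvPairsMap {f : Int → Int} (u : List Int) :
    (u.map f).zip (u.map f).tail = (u.zip u.tail).map (Prod.map f f) := by
  rw [← List.map_tail, List.zip_map]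

lemma pvChunks_nil : pvChunks [] = [[]] := by decide

lemma pvChunks_cons_blank (l : String) (rest : List String) (h : PySem.Str.strip l = "") :
    pvChunks (l :: rest) = [] :: pvChunks rest := by
  unfold pvChunks
  rw [pvBlanks_cons_blank _ _ h, List.tail_cons]
  have hhead : pvBlanks rest = -1 :: (pvBlanks rest).tail := rfl
  conv_lhs => rw [hhead, List.map_cons, List.zip_cons_cons, List.map_cons]
  congr 1
  have hm : ((-1 + 1) :: (pvBlanks rest).tail.map (fun x => x + 1)) = (pvBlanks rest).map (fun x => x + 1) := by
    conv_rhs => rw [hhead]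
    rw [List.map_cons]
  rw [hm, List.map_tail, pvPairsMap, List.map_map]
  apply List.map_congr_left
  intro p hp
  have h1 : -1 ≤ p.1 := pvMemBlanksGe rest p.1 (List.of_mem_zip hp).1
  have h2 : 0 ≤ p.2 := pvBlanks_tail_nonneg rest p.2 (List.of_mem_zip hp).2
  show PySem.List.slice (l :: rest) (some (p.1 + 1 + 1)) (some (p.2 + 1)) = _
  rw [pvSliceShift _ _ _ _ (by omega) h2]

lemma pvChunks_cons_nonblank (l : String) (rest : List String) (h : ¬ PySem.Str.strip l = "") :
    ∃ c cs, pvChunks rest = c :: cs ∧ pvChunks (l :: rest) = (l :: c) :: cs := by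
  have hhead : pvBlanks rest = -1 :: (pvBlanks rest).tail := rfl
  have ht : (pvBlanks rest).tail ≠ [] := by simp [pvBlanks]
  obtain ⟨t0, t', htt⟩ := List.exists_cons_of_ne_nil ht
  have ht0 : 0 ≤ t0 := pvBlanks_tail_nonneg rest t0 (by rw [htt]; exact List.mem_cons_self)
  refine ⟨PySem.List.slice rest (some (-1 + 1)) (some t0),
    ((t0 :: t').zip t').map (fun p => PySem.List.slice rest (some (p.1 + 1)) (some p.2)), ?_, ?_⟩
  · unfold pvChunks
    conv_lhs => rw [hhead, List.tail_cons, htt, List.zip_cons_cons, List.map_cons]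
  · unfold pvChunks
    rw [pvBlanks_cons_nonblank _ _ h, ← List.map_tail, htt, List.tail_cons, List.map_cons,
      List.zip_cons_cons, List.map_cons]
    congr 1
    · show PySem.List.slice (l :: rest) (some (-1 + 1)) (some (t0 + 1)) = _
      norm_num
      exact pvSliceZero l rest t0 ht0
    · have hmc : ((t0 + 1) :: t'.map (fun x => x + 1)) = (t0 :: t').map (fun x => x + 1) := rfl
      rw [hmc, show t'.map (fun x => x + 1) = ((t0 :: t').map (fun x => x + 1)).tail from rfl,
        pvPairsMap, List.map_map]
      apply List.map_congr_left
      intro p hp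
      have hp1 : p.1 ∈ (pvBlanks rest).tail := by rw [htt]; exact (List.of_mem_zip hp).1
      have hp2 : p.2 ∈ (pvBlanks rest).tail := by
        rw [htt]; exact List.mem_cons_of_mem _ (List.of_mem_zip hp).2
      have h1 : 0 ≤ p.1 := pvBlanks_tail_nonneg rest p.1 hp1
      have h2 : 0 ≤ p.2 := pvBlanks_tail_nonneg rest p.2 hp2
      show PySem.List.slice (l :: rest) (some (p.1 + 1 + 1)) (some (p.2 + 1)) = _
      rw [pvSliceShift _ _ _ _ (by omega) h2]

lemma pvChunks_head (lines : List String) :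
    (pvChunks lines).head? = some (lines.takeWhile (fun x => PySem.Str.strip x ≠ "")) := by
  induction lines with
  | nil => rw [pvChunks_nil]; simp
  | cons l rest ih =>
    by_cases h : PySem.Str.strip l = ""
    · rw [pvChunks_cons_blank _ _ h]
      simp [h]
    · obtain ⟨c, cs, hr, hc⟩ := pvChunks_cons_nonblank l rest h
      rw [hc]
      rw [hr] at ih
      simp only [List.head?_cons, Option.some.injEq] at ih ⊢
      rw [List.takeWhile_cons]
      simp [h, ih]

lemma pvFilterChunks (lines : List String) :
    (pvChunks lines).filter (fun c => !c.isEmpty) = pvGroups lines := by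
  induction lines with
  | nil => rw [pvChunks_nil, pvGroups]; simp
  | cons l rest ih =>
    by_cases h : PySem.Str.strip l = ""
    · rw [pvChunks_cons_blank _ _ h]
      conv_rhs => rw [pvGroups.eq_def]
      simp only [h, ne_eq, not_true_eq_false, if_false]
      simpa using ih
    · obtain ⟨c, cs, hr, hc⟩ := pvChunks_cons_nonblank l rest h
      have hctake : c = rest.takeWhile (fun x => PySem.Str.strip x ≠ "") := by
        have := pvChunks_head rest
        rw [hr] at this
        simpa using this
      rw [hc]
      conv_rhs => rw [pvGroups.eq_def]
      simp only [h, ne_eq, not_false_eq_true, if_true, List.filter_cons]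
      rw [hr, List.filter_cons] at ih
      by_cases hc0 : c = []
      · subst hc0
        simp only [List.isEmpty_nil, Bool.not_true, Bool.false_eq_true, if_false] at ih
        have hdrop : rest.dropWhile (fun x => PySem.Str.strip x ≠ "") = rest := by
          cases rest with
          | nil => rfl
          | cons r rs =>
            rw [List.takeWhile_cons] at hctake
            by_cases hr0 : PySem.Str.strip r ≠ ""
            · simp [hr0] at hctake
            · rw [List.dropWhile_cons]
              simp only [hr0, decide_false, Bool.false_eq_true, if_false]
        rw [hdrop, ← hctake]
        simpa using ih
      · cases rest with
        | nil => simp at hctake; exact absurd hctake hc0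
        | cons r rs =>
          rw [List.takeWhile_cons] at hctake
          by_cases hr0 : PySem.Str.strip r ≠ ""
          · simp [hr0] at hctake
            conv_rhs at ih => rw [pvGroups.eq_def]
            simp only [hr0, ne_eq, not_false_eq_true, if_true] at ih
            have hce : c.isEmpty = false := by simp [hctake]
            simp only [hce] at ih ⊢
            rw [List.takeWhile_cons, List.dropWhile_cons]
            simp only [hr0, not_false_eq_true, decide_true, if_true]
            obtain ⟨h1, h2⟩ := (List.cons.injEq _ _ _ _).mp ih
            rw [h1, ← h2]
            simp
          · simp only [hr0, decide_false] at hctake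
            simp at hctake
            exact absurd hctake hc0

lemma pvRenderEnum (gs : List (List String)) (s : Int) :
    (PySem.List.enumerate gs s).map
      (fun p => ("paragraph_" ++ PySem.Int.toStr p.1, PySem.Str.join " " (p.2.map PySem.Str.strip)))
      = pvRender s gs := by
  induction gs generalizing s with
  | nil => simp [PySem.List.enumerate_nil, pvRender]
  | cons g t ih => simp [PySem.List.enumerate_cons, pvRender, ih]

-- ===== VERDICT (by name: the statement is the Claim_ definition above) =====
theorem extract_translatable_content_spec : Claim_equal_extract_translatable_content := by
  intro content _
  unfold Spec_extract_translatable_content extract_translatable_content extract_translatable_content_alt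
  rw [pvAGo_eq]
  simp [pvRenderEnum, pvFilterChunks]
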